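-- pv_equiv track=rewrite | github.com/GolzitskyNikolay/SPEAC-analysis | speac_library/speac/new_form.py | collect_by_differences
-- ===== SOURCE A (Python) =====
-- def collect_by_differences(density_map):
--     previous = None
--     count = 0
--     time = density_map[0][1]
--     result = []
--
--     while len(density_map) >= 0:
--         if len(density_map) == 0:
--             result.append([count, time])
--
--             if len(density_map) == 0:
--                 break
--
--         elif previous is None:
--             previous = density_map.pop(0)
--             count += 1
--
--         elif abs(density_map[0][0] - previous[0]) > 2:
--             result.append([count, time])
--             time = density_map[0][1]
--             previous = density_map[0]
--             count = 0
--
--         else: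
--             previous = density_map.pop(0)
--             count += 1
--
--     return result
-- ===== SOURCE B (Python) =====
-- def collect_by_differences(density_map):
--     time = density_map[0][1]
--     values = [row[0] for row in density_map]
--     n = len(values)
--     bounds = [0] + [i for i in range(1, n) if abs(values[i] - values[i - 1]) > 2] + [n]
--     return [[e - s, density_map[s][1]] for s, e in zip(bounds, bounds[1:])]
-- ===== Notes on version B (the rewrite author's own statement) =====
-- stated objective: alternative
-- what changed: A's single stateful pop-driven while loop (previous/count/time state machine that mutates the input) is replaced by two stateless passes: first compute the list of run-boundary indices, then map adjacent boundary pairs to [length, start-time]; Pre_ excludes exactly the inputs where A raises IndexError (empty map, a row without the accessed element).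
import Mathlib
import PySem

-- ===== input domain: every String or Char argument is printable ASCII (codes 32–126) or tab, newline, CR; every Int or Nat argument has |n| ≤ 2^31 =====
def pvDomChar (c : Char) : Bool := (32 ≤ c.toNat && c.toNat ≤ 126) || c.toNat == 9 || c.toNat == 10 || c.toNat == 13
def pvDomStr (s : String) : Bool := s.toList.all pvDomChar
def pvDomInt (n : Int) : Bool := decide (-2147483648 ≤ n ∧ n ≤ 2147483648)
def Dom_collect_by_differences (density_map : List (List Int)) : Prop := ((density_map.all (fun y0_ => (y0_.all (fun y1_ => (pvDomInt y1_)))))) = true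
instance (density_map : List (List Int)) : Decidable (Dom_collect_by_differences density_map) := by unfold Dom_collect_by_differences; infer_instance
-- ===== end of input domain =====

-- B replaces A's stateful mutating while-loop by two stateless passes (boundary indices, then an
-- adjacent-pair measuring pass); equivalence is about the RETURN value only: Python A empties its
-- argument via pop(0), B leaves it untouched.

-- ===== PORT A =====
-- termination measure helper: one extra step is pending when the head starts a new run
def bonusA (previous : Option (List Int)) (dm : List (List Int)) : Nat :=
  match previous, dm with
  | some p, h :: _ => if 2 < (h.headD 0 - p.headD 0).natAbs then 1 else 0
  | _, _ => 0

theorem bonusA_le_one (previous : Option (List Int)) (dm : List (List Int)) :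
    bonusA previous dm ≤ 1 := by
  unfold bonusA
  split
  · split <;> simp
  · simp

-- A's while loop over the mutable state (previous, count, time, density_map, result).
-- Row accesses row[0]/row[1] are ported as headD 0 / getD 1 0; Pre_ below guarantees the
-- accessed elements exist, so inside Pre_ this is exact (outside, Python A raises IndexError).
def collectLoop (previous : Option (List Int)) (count time : Int)
    (density_map result : List (List Int)) : List (List Int) :=
  match density_map with
  | [] => result ++ [[count, time]]                         -- len == 0 branch, then break
  | h :: rest =>
    match previous with
    | none => collectLoop (some h) (count + 1) time rest result        -- previous is None: pop
    | some p =>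
      if 2 < (h.headD 0 - p.headD 0).natAbs then                       -- abs(dm[0][0]-previous[0]) > 2
        collectLoop (some h) 0 (h.getD 1 0) (h :: rest) (result ++ [[count, time]])
      else
        collectLoop (some h) (count + 1) time rest result              -- else: pop
termination_by 2 * density_map.length + bonusA previous density_map
decreasing_by
  · have h1 := bonusA_le_one (some h) rest
    have h2 : bonusA none (h :: rest) = 0 := rfl
    simp only [List.length_cons, h2]
    omega
  · rename_i hb
    have h2 : bonusA (some h) (h :: rest) = 0 := by
      show (if 2 < (h.headD 0 - h.headD 0).natAbs then 1 else 0) = 0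
      simp
    have h3 : bonusA (some p) (h :: rest) = 1 := by
      show (if 2 < (h.headD 0 - p.headD 0).natAbs then 1 else 0) = 1
      exact if_pos hb
    simp only [List.length_cons, h2, h3]
    omega
  · have h1 := bonusA_le_one (some h) rest
    simp only [List.length_cons]
    omega

def collect_by_differences (density_map : List (List Int)) : List (List Int) :=
  collectLoop none 0 ((density_map.headD []).getD 1 0) density_map []

-- ===== PORT B =====
-- Pass 1 builds the boundary-index list, pass 2 maps adjacent pairs to [length, start time].
-- range(1, n) is ported as List.range' 1 (n - 1) (exact for n ≥ 0); indices produced by it are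
-- always in range, so values[i] / values[i-1] ported with getD are exact; Source B's initial
-- density_map[0][1] touch only forces the IndexError on an empty map and is pure here.
def collect_by_differences_alt (density_map : List (List Int)) : List (List Int) :=
  let values := density_map.map (fun row => row.headD 0)
  let n := density_map.length
  let bounds : List Nat :=
    0 :: ((List.range' 1 (n - 1)).filter
            (fun i => decide (2 < (values.getD i 0 - values.getD (i - 1) 0).natAbs)) ++ [n])
  (bounds.zip bounds.tail).map
    (fun p => [(p.2 : Int) - (p.1 : Int), (density_map.getD p.1 []).getD 1 0])

-- ===== PRECONDITION & SPEC =====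
-- Exactly the inputs on which Python A returns (elsewhere A raises IndexError): a nonempty map
-- whose first row has the [1] element, every row has the [0] element, and every row that starts
-- a new run (difference > 2 to its predecessor) has the [1] element.
def Pre_collect_by_differences (density_map : List (List Int)) : Prop :=
  density_map ≠ [] ∧ 2 ≤ (density_map.headD []).length ∧
  (∀ l ∈ density_map, 1 ≤ l.length) ∧
  (∀ i ∈ List.range density_map.length, 1 ≤ i →
    2 < ((density_map.getD i []).headD 0 - (density_map.getD (i - 1) []).headD 0).natAbs →
    2 ≤ (density_map.getD i []).length)
instance (density_map : List (List Int)) : Decidable (Pre_collect_by_differences density_map) := by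
  unfold Pre_collect_by_differences; infer_instance

def pvWitness_collect_by_differences : List (List Int) := [[1, 2], [2, 3], [9, 4], [10, 5]]

def Spec_collect_by_differences (density_map : List (List Int)) (out : List (List Int)) : Prop := out = collect_by_differences_alt density_map
instance (density_map : List (List Int)) (out : List (List Int)) : Decidable (Spec_collect_by_differences density_map out) := by unfold Spec_collect_by_differences; infer_instance

-- ===== CLAIM (what is proved, stated in full; the proofs are below) =====
def Claim_equal_collect_by_differences : Prop := ∀ (density_map : List (List Int)), Dom_collect_by_differences density_map → Pre_collect_by_differences density_map → Spec_collect_by_differences density_map (collect_by_differences density_map)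

-- ===== LEMMAS AND PROOFS =====

-- Proof-side normal form of A's loop after the first pop: only the value previous[0] matters.
def goA (p count time : Int) (dm : List (List Int)) : List (List Int) :=
  match dm with
  | [] => [[count, time]]
  | h :: rest =>
    if 2 < (h.headD 0 - p).natAbs then
      [count, time] :: goA (h.headD 0) 1 (h.getD 1 0) rest
    else
      goA (h.headD 0) (count + 1) time rest

-- length of the current (first) run, and the runs emitted after it
def runlenA (p : Int) (dm : List (List Int)) : Nat :=
  match dm with
  | [] => 0
  | h :: rest => if 2 < (h.headD 0 - p).natAbs then 0 else 1 + runlenA (h.headD 0) rest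

def afterA (p : Int) (dm : List (List Int)) : List (List Int)  :=
  match dm with
  | [] => []
  | h :: rest =>
    if 2 < (h.headD 0 - p).natAbs then goA (h.headD 0) 1 (h.getD 1 0) rest
    else afterA (h.headD 0) rest

theorem collectLoop_eq_goA (p : List Int) (c t : Int) (dm res : List (List Int)) :
    collectLoop (some p) c t dm res = res ++ goA (p.headD 0) c t dm := by
  induction dm generalizing p c t res with
  | nil => simp [collectLoop, goA]
  | cons h rest ih =>
    by_cases hb : 2 < (h.headD 0 - p.headD 0).natAbs
    · rw [collectLoop, if_pos hb, collectLoop, if_neg (by simp), ih, goA, if_pos hb]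
      simp
    · rw [collectLoop, if_neg hb, ih, goA, if_neg hb]

theorem goA_eq (p c t : Int) (dm : List (List Int)) :
    goA p c t dm = [c + (runlenA p dm : Int), t] :: afterA p dm := by
  induction dm generalizing p c t with
  | nil => simp [goA, runlenA, afterA]
  | cons h rest ih =>
    rw [goA, runlenA, afterA]
    by_cases hb : 2 < (h.headD 0 - p).natAbs
    · rw [if_pos hb, if_pos hb, if_pos hb]
      simp
    · rw [if_neg hb, if_neg hb, if_neg hb, ih]
      have harith : c + 1 + (runlenA (h.headD 0) rest : Int) =
          c + ((1 + runlenA (h.headD 0) rest : Nat) : Int) := by push_cast; ring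
      rw [harith]

theorem headD_eq (l : List Int) : l.head?.getD 0 = l.headD 0 := by cases l <;> rfl

-- Proof-side names for B's two passes
def valsB (dm : List (List Int)) : List Int := dm.map (fun row => row.headD 0)

def predB (dm : List (List Int)) (i : Nat) : Bool :=
  decide (2 < ((valsB dm).getD i 0 - (valsB dm).getD (i - 1) 0).natAbs)

def boundsB (dm : List (List Int)) : List Nat :=
  0 :: ((List.range' 1 (dm.length - 1)).filter (predB dm) ++ [dm.length])

def pairsOut (dm : List (List Int)) (bs : List Nat) : List (List Int) :=
  (bs.zip bs.tail).map
    (fun p => [(p.2 : Int) - (p.1 : Int), (dm.getD p.1 []).getD 1 0])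

theorem alt_def (dm : List (List Int)) :
    collect_by_differences_alt dm = pairsOut dm (boundsB dm) := rfl

theorem pairsOut_cons_cons (dm : List (List Int)) (a b : Nat) (bs : List Nat) :
    pairsOut dm (a :: b :: bs) =
      [(b : Int) - (a : Int), (dm.getD a []).getD 1 0] :: pairsOut dm (b :: bs) := rfl

theorem map_succ_cons (x : Nat) (L : List Nat) :
    (x + 1) :: L.map (· + 1) = (x :: L).map (· + 1) := rfl

theorem map_succ_cons' (x : Nat) (L : List Nat) :
    (x :: L).map (· + 1) = (x + 1) :: L.map (· + 1) := rfl

theorem pairsOut_shift (h : List Int) (tl : List (List Int)) (bs : List Nat) :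
    pairsOut (h :: tl) (bs.map (· + 1)) = pairsOut tl bs := by
  induction bs with
  | nil => rfl
  | cons x bs ih =>
    cases bs with
    | nil => rfl
    | cons y bs' =>
      simp only [List.map_cons] at ih ⊢
      rw [pairsOut_cons_cons, pairsOut_cons_cons, ih]
      have e1 : ((y + 1 : Nat) : Int) - ((x + 1 : Nat) : Int) = (y : Int) - (x : Int) := by
        push_cast; ring
      have e2 : (h :: tl).getD (x + 1) [] = tl.getD x [] := by simp [List.getD]
      rw [e1, e2]

theorem predB_shift (h : List Int) (tl : List (List Int)) (i : Nat) (hi : 1 ≤ i) :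
    predB (h :: tl) (i + 1) = predB tl i := by
  obtain ⟨k, rfl⟩ : ∃ k, i = k + 1 := ⟨i - 1, by omega⟩
  simp [predB, valsB, List.getD]

theorem filterB_shift (h : List Int) (tl : List (List Int)) (m : Nat) :
    (List.range' 2 m).filter (predB (h :: tl)) =
      ((List.range' 1 m).filter (predB tl)).map (· + 1) := by
  have h1 : (List.range' 1 m).map (· + 1) = (List.range' 1 m).map (1 + ·) := by
    simp [Nat.add_comm]
  have h2 : List.range' 2 m = (List.range' 1 m).map (· + 1) := by
    rw [h1, List.map_add_range']
  rw [h2, List.filter_map]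
  congr 1
  apply List.filter_congr
  intro i hi
  exact predB_shift h tl i (List.mem_range'_1.1 hi).1

-- the boundary-list recurrence used by the induction
theorem boundsB_cons (h h2 : List Int) (rest2 : List (List Int)) :
    boundsB (h :: h2 :: rest2) =
      if 2 < (h2.headD 0 - h.headD 0).natAbs then
        0 :: (boundsB (h2 :: rest2)).map (· + 1)
      else
        0 :: (((List.range' 1 rest2.length).filter (predB (h2 :: rest2)) ++
                [rest2.length + 1]).map (· + 1)) := by
  have hstep : boundsB (h :: h2 :: rest2) =
      0 :: ((1 :: List.range' 2 rest2.length).filter (predB (h :: h2 :: rest2)) ++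
        [rest2.length + 2]) := rfl
  have hb2 : boundsB (h2 :: rest2) =
      0 :: ((List.range' 1 rest2.length).filter (predB (h2 :: rest2)) ++
        [rest2.length + 1]) := rfl
  by_cases hb : 2 < (h2.headD 0 - h.headD 0).natAbs
  · have hp1 : predB (h :: h2 :: rest2) 1 = true := by
      simp [predB, valsB, List.getD]
      rw [headD_eq, headD_eq]
      exact hb
    rw [if_pos hb, hstep, hb2, List.filter_cons, hp1,
      filterB_shift h (h2 :: rest2) rest2.length]
    simp
  · have hp1 : predB (h :: h2 :: rest2) 1 = false := by
      simp [predB, valsB, List.getD]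
      rw [headD_eq, headD_eq]
      exact Nat.le_of_not_lt hb
    rw [if_neg hb, hstep, List.filter_cons, hp1,
      filterB_shift h (h2 :: rest2) rest2.length]
    simp

-- core B-side lemma: B on a nonempty map equals A's post-first-pop loop
theorem alt_eq_goA (h : List Int) (rest : List (List Int)) :
    collect_by_differences_alt (h :: rest) = goA (h.headD 0) 1 (h.getD 1 0) rest := by
  induction rest generalizing h with
  | nil =>
    simp [alt_def, boundsB, pairsOut, goA]
  | cons h2 rest2 ih =>
    rw [alt_def, boundsB_cons]
    by_cases hb : 2 < (h2.headD 0 - h.headD 0).natAbs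
    · rw [if_pos hb]
      have hb2 : boundsB (h2 :: rest2) =
          0 :: ((List.range' 1 rest2.length).filter (predB (h2 :: rest2)) ++
            [rest2.length + 1]) := rfl
      rw [hb2, map_succ_cons', pairsOut_cons_cons, map_succ_cons, ← hb2, pairsOut_shift,
        ← alt_def, ih h2, goA, if_pos hb]
      norm_num [List.getD]
    · rw [if_neg hb]
      rcases he : (List.range' 1 rest2.length).filter (predB (h2 :: rest2)) ++
          [rest2.length + 1] with _ | ⟨e1, B2'⟩
      · exact absurd he (by simp)
      have hb2 : boundsB (h2 :: rest2) = 0 :: (e1 :: B2') := by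
        rw [show boundsB (h2 :: rest2) =
          0 :: ((List.range' 1 rest2.length).filter (predB (h2 :: rest2)) ++
            [rest2.length + 1]) from rfl, he]
      have htl := ih h2
      rw [alt_def, hb2, pairsOut_cons_cons, goA_eq] at htl
      injection htl with hh ht
      have hhead : (e1 : Int) = 1 + (runlenA (h2.headD 0) rest2 : Int) := by
        simp only [List.getD, Nat.cast_zero, sub_zero, List.getElem?_cons_zero,
          Option.getD_some, List.cons.injEq, and_true] at hh
        exact hh
      rw [map_succ_cons' e1 B2', pairsOut_cons_cons, map_succ_cons, pairsOut_shift, ht,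
        goA, if_neg hb, goA_eq]
      have harith : (((e1 + 1 : Nat)) : Int) - ((0 : Nat) : Int) =
          1 + 1 + (runlenA (h2.headD 0) rest2 : Int) := by push_cast; omega
      rw [harith]
      simp [List.getD]

-- ===== VERDICT (by name: the statement is the Claim_ definition above) =====
theorem collect_by_differences_spec : Claim_equal_collect_by_differences := by
  intro dm _hdom hpre
  unfold Spec_collect_by_differences
  obtain ⟨hne, -, -, -⟩ := hpre
  cases dm with
  | nil => exact absurd rfl hne
  | cons h rest =>
    rw [alt_eq_goA]
    show collectLoop none 0 _ (h :: rest) [] = _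
    rw [collectLoop, collectLoop_eq_goA]
    simp [List.getD]
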